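-- pv_equiv track=rewrite | github.com/johnblair7/seed-finder-lite | src/targetfinder/search.py | _parse_md_mismatch_positions
-- ===== SOURCE A (Python) =====
-- def _parse_md_mismatch_positions(read_len: int, md_str: str) -> list[int]:
--     """
--     Parse SAM MD:Z tag to get 0-based read positions of mismatches.
--     MD format: e.g. "10A5G2" = 10 match, ref A (mismatch), 5 match, ref G (mismatch), 2 match.
--     """
--     positions: list[int] = []
--     read_pos = 0
--     i = 0
--     while i < len(md_str) and read_pos < read_len:
--         if md_str[i].isdigit():
--             j = i
--             while j < len(md_str) and md_str[j].isdigit():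
--                 j += 1
--             run = int(md_str[i:j])
--             read_pos += run
--             i = j
--         elif md_str[i] in "ACGTN":
--             positions.append(read_pos)
--             read_pos += 1
--             i += 1
--         else:
--             i += 1
--     return positions
-- ===== SOURCE B (Python) =====
-- import re
-- from itertools import accumulate, takewhile
--
-- def _parse_md_mismatch_positions(read_len: int, md_str: str) -> list[int]:
--     # Staged passes over the whole string (no early exit, no running accumulator loop):
--     # 1. tokenize into maximal digit runs / single chars,
--     # 2. per-token read-length deltas,
--     # 3. prefix sums = read position at the start of each token,
--     # 4. keep the starts of mismatch tokens,
--     # 5. since positions are nondecreasing, A's early exit == takewhile(< read_len).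
--     toks = re.findall(r'\d+|.', md_str, re.DOTALL)
--     deltas = [int(t) if t.isdigit() else (1 if t in "ACGTN" else 0) for t in toks]
--     starts = accumulate(deltas, initial=0)
--     all_pos = [p for t, p in zip(toks, starts) if not t.isdigit() and t in "ACGTN"]
--     return list(takewhile(lambda p: p < read_len, all_pos))
-- ===== Notes on version B (the rewrite author's own statement) =====
-- stated objective: alternative
-- what changed: B replaces A's single-pass early-exit scanner with staged whole-string passes: regex tokenization, a list of per-token read-length deltas, prefix sums via itertools.accumulate, a comprehension selecting mismatch-token start positions, and a final takewhile cut at read_len (valid because read positions are nondecreasing).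
import Mathlib
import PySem

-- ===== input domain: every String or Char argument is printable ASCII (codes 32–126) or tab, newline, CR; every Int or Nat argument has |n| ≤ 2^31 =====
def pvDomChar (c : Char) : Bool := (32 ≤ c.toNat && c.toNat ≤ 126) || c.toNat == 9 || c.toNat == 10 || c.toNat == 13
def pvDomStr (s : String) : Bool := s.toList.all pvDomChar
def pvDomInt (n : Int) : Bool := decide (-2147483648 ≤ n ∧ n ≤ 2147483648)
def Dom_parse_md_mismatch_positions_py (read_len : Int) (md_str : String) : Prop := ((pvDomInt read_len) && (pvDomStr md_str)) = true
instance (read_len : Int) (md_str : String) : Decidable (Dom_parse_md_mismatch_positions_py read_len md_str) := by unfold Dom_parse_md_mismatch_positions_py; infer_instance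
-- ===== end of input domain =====

-- B replaces A's single-pass early-exit scanner with staged whole-string passes
-- (tokenize, per-token deltas, prefix sums, select mismatch starts, takeWhile cut): alternative decomposition, same O(n).


-- ===== PORT A =====
-- int() applied to a nonempty run of ASCII digits is its base-10 value (exact on that slice shape)
def pvDigitsVal (ds : List Char) : Int := ds.foldl (fun a c => a * 10 + ((c.toNat : Int) - 48)) 0

-- A's while-loop over the index i: the list tail plays the role of md_str[i:]; the inner
-- digit-scanning while (i..j) is the takeWhile/dropWhile split of the same maximal digit run.
def pvMdLoopA (read_len : Int) : List Char → Int → List Int → List Int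
  | [], _, positions => positions
  | c :: rest, read_pos, positions =>
    if read_pos < read_len then
      if PySem.Chars.isdigit c then
        pvMdLoopA read_len ((c :: rest).dropWhile PySem.Chars.isdigit)
          (read_pos + pvDigitsVal ((c :: rest).takeWhile PySem.Chars.isdigit)) positions
      else if "ACGTN".toList.contains c then
        pvMdLoopA read_len rest (read_pos + 1) (positions ++ [read_pos])
      else
        pvMdLoopA read_len rest read_pos positions
    else positions
  termination_by cs => cs.length
  decreasing_by
  · simp only [List.dropWhile_cons, *]
    exact Nat.lt_succ_of_le (List.length_dropWhile_le _ _)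
  all_goals simp

def parse_md_mismatch_positions_py (read_len : Int) (md_str : String) : List Int :=
  pvMdLoopA read_len md_str.toList 0 []

-- ===== PORT B =====
-- stage 1: re.findall(r'\d+|.', md_str, re.DOTALL) — maximal digit runs / single chars, as char lists
def pvTokens : List Char → List (List Char)
  | [] => []
  | c :: rest =>
    if PySem.Chars.isdigit c then
      ((c :: rest).takeWhile PySem.Chars.isdigit) :: pvTokens ((c :: rest).dropWhile PySem.Chars.isdigit)
    else [c] :: pvTokens rest
  termination_by cs => cs.length
  decreasing_by
  · simp only [List.dropWhile_cons, *]
    exact Nat.lt_succ_of_le (List.length_dropWhile_le _ _)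
  all_goals simp

-- t.isdigit() on a token (nonempty and all digits)
def pvIsDigitTok (t : List Char) : Bool := !t.isEmpty && t.all PySem.Chars.isdigit
-- `t in "ACGTN"`; only applied to single-char tokens, where substring membership = char membership (exact there)
def pvIsMismatchTok (t : List Char) : Bool :=
  match t with
  | [c] => "ACGTN".toList.contains c
  | _ => false

-- stage 2: per-token read-length delta
def pvDelta (t : List Char) : Int :=
  if pvIsDigitTok t then pvDigitsVal t else if pvIsMismatchTok t then 1 else 0

def parse_md_mismatch_positions_py_alt (read_len : Int) (md_str : String) : List Int :=
  let toks := pvTokens md_str.toList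
  let deltas := toks.map pvDelta
  let starts := deltas.scanl (· + ·) 0          -- accumulate(deltas, initial=0); zip below truncates the extra entry
  let allPos := ((toks.zip starts).filter (fun tp => !pvIsDigitTok tp.1 && pvIsMismatchTok tp.1)).map (·.2)
  allPos.takeWhile (fun p => decide (p < read_len))

-- ===== PRECONDITION & SPEC =====
def Spec_parse_md_mismatch_positions_py (read_len : Int) (md_str : String) (out : List Int) : Prop := out = parse_md_mismatch_positions_py_alt read_len md_str
instance (read_len : Int) (md_str : String) (out : List Int) : Decidable (Spec_parse_md_mismatch_positions_py read_len md_str out) := by unfold Spec_parse_md_mismatch_positions_py; infer_instance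

-- ===== CLAIM (what is proved, stated in full; the proofs are below) =====
def Claim_equal_parse_md_mismatch_positions_py : Prop := ∀ (read_len : Int) (md_str : String), Dom_parse_md_mismatch_positions_py read_len md_str → Spec_parse_md_mismatch_positions_py read_len md_str (parse_md_mismatch_positions_py read_len md_str)

-- ===== LEMMAS AND PROOFS =====

-- proof helper: A's loop reinterpreted on the token stream
def pvLoopT (read_len : Int) : List (List Char) → Int → List Int → List Int
  | [], _, positions => positions
  | t :: ts, rp, positions =>
    if rp < read_len then
      if pvIsDigitTok t then pvLoopT read_len ts (rp + pvDigitsVal t) positions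
      else if pvIsMismatchTok t then pvLoopT read_len ts (rp + 1) (positions ++ [rp])
      else pvLoopT read_len ts rp positions
    else positions

-- proof helper: mismatch-token start positions, recursively
def pvPos : List (List Char) → Int → List Int
  | [], _ => []
  | t :: ts, rp =>
    if pvIsDigitTok t then pvPos ts (rp + pvDelta t)
    else if pvIsMismatchTok t then rp :: pvPos ts (rp + pvDelta t)
    else pvPos ts (rp + pvDelta t)

lemma pvDigitsVal_nonneg (ds : List Char) (h : ∀ c ∈ ds, PySem.Chars.isdigit c = true) :
    0 ≤ pvDigitsVal ds := by
  suffices H : ∀ (ds : List Char), (∀ c ∈ ds, PySem.Chars.isdigit c = true) →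
      ∀ a : Int, 0 ≤ a → 0 ≤ ds.foldl (fun a c => a * 10 + ((c.toNat : Int) - 48)) a by
    exact H ds h 0 le_rfl
  intro ds
  induction ds with
  | nil => intro _ a ha; simpa using ha
  | cons c cs ih =>
    intro hall a ha
    have hc := hall c (by simp)
    have h48 : (48 : Int) ≤ (c.toNat : Int) := by
      simp only [PySem.Chars.isdigit, Bool.and_eq_true, decide_eq_true_eq] at hc
      have h1 : ('0' : Char).val.toNat ≤ c.val.toNat :=
        UInt32.le_iff_toNat_le.mp (Char.le_def.mp hc.1)
      have h2 : ('0' : Char).val.toNat = 48 := by decide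
      have h3 : (48 : Nat) ≤ c.toNat := by rw [← h2]; exact h1
      exact_mod_cast h3
    simp only [List.foldl_cons]
    exact ih (fun c hmem => hall c (by simp [hmem])) _ (by nlinarith)

lemma pvDelta_nonneg (t : List Char) (h : pvIsDigitTok t = true → ∀ c ∈ t, PySem.Chars.isdigit c = true) :
    0 ≤ pvDelta t := by
  unfold pvDelta
  split_ifs with h1 h2
  · exact pvDigitsVal_nonneg t (h h1)
  · norm_num
  · exact le_refl (0 : Int)

-- every token pvTokens produces: a nonempty all-digit run, or a single non-digit char
def pvWFtok (t : List Char) : Prop := t ≠ [] ∧ (∀ c ∈ t, PySem.Chars.isdigit c = true) ∨ (∃ c, t = [c] ∧ PySem.Chars.isdigit c = false)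

lemma pvIsDigitTok_takeWhile (c : Char) (rest : List Char) (hd : PySem.Chars.isdigit c = true) :
    pvIsDigitTok ((c :: rest).takeWhile PySem.Chars.isdigit) = true := by
  rw [List.takeWhile_cons, if_pos hd]
  simp only [pvIsDigitTok, List.isEmpty_cons, Bool.not_false, Bool.true_and, List.all_cons, hd,
    List.all_eq_true]
  intro x hx
  exact List.mem_takeWhile_imp hx

lemma pvTokens_wf : ∀ (n : Nat) (cs : List Char), cs.length ≤ n → ∀ t ∈ pvTokens cs, pvWFtok t := by
  intro n
  induction n with
  | zero =>
    intro cs h t ht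
    have : cs = [] := List.eq_nil_of_length_eq_zero (Nat.le_zero.mp h)
    subst this; simp [pvTokens] at ht
  | succ n ih =>
    intro cs h t ht
    cases cs with
    | nil => simp [pvTokens] at ht
    | cons c rest =>
      have hrest : rest.length ≤ n := by simpa using Nat.lt_succ_iff.mp (by simpa using h)
      by_cases hd : PySem.Chars.isdigit c = true
      · rw [pvTokens, if_pos hd] at ht
        rcases List.mem_cons.mp ht with rfl | ht2
        · left
          constructor
          · rw [List.takeWhile_cons, if_pos hd]; simp
          · intro x hx; exact List.mem_takeWhile_imp hx
        · refine ih _ ?_ t ht2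
          have h1 : ((c :: rest).dropWhile PySem.Chars.isdigit).length ≤ rest.length := by
            rw [List.dropWhile_cons, if_pos hd]
            exact List.length_dropWhile_le _ _
          exact Nat.le_trans h1 hrest
      · rw [pvTokens, if_neg hd] at ht
        rcases List.mem_cons.mp ht with rfl | ht2
        · right; exact ⟨c, rfl, by simpa using hd⟩
        · exact ih rest hrest t ht2

lemma pvWF_delta_nonneg (t : List Char) (h : pvWFtok t) : 0 ≤ pvDelta t := by
  apply pvDelta_nonneg
  intro hdig
  rcases h with ⟨_, hall⟩ | ⟨c, rfl, hc⟩
  · exact hall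
  · simp [pvIsDigitTok, hc] at hdig

lemma pvPos_ge : ∀ ts rp, (∀ t ∈ ts, pvWFtok t) → ∀ p ∈ pvPos ts rp, rp ≤ p := by
  intro ts
  induction ts with
  | nil => intro rp _ p hp; simp [pvPos] at hp
  | cons t ts ih =>
    intro rp hwf p hp
    have hδ : 0 ≤ pvDelta t := pvWF_delta_nonneg t (hwf t (by simp))
    have hwf' : ∀ u ∈ ts, pvWFtok u := fun u hu => hwf u (by simp [hu])
    rw [pvPos] at hp
    split_ifs at hp with h1 h2
    · have := ih _ hwf' p hp; omega
    · rcases List.mem_cons.mp hp with rfl | hp2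
      · exact le_rfl
      · have := ih _ hwf' p hp2; omega
    · have := ih _ hwf' p hp; omega

lemma pvLoopA_eq_loopT (read_len : Int) :
    ∀ (n : Nat) (cs : List Char), cs.length ≤ n → ∀ rp pos,
      pvMdLoopA read_len cs rp pos = pvLoopT read_len (pvTokens cs) rp pos := by
  intro n
  induction n with
  | zero =>
    intro cs h rp pos
    have : cs = [] := List.eq_nil_of_length_eq_zero (Nat.le_zero.mp h)
    subst this; simp [pvMdLoopA, pvTokens, pvLoopT]
  | succ n ih =>
    intro cs h rp pos
    cases cs with
    | nil => simp [pvMdLoopA, pvTokens, pvLoopT]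
    | cons c rest =>
      have hrest : rest.length ≤ n := by simpa using Nat.lt_succ_iff.mp (by simpa using h)
      by_cases hrp : rp < read_len
      · by_cases hd : PySem.Chars.isdigit c = true
        · have e1 : pvTokens (c :: rest)
              = ((c :: rest).takeWhile PySem.Chars.isdigit)
                :: pvTokens ((c :: rest).dropWhile PySem.Chars.isdigit) := by
            rw [pvTokens]; simp [hd]
          rw [pvMdLoopA, e1, pvLoopT]
          simp only [if_pos hrp, hd, if_true, pvIsDigitTok_takeWhile c rest hd]
          apply ih
          have h1 : ((c :: rest).dropWhile PySem.Chars.isdigit).length ≤ rest.length := by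
            rw [List.dropWhile_cons, if_pos hd]
            exact List.length_dropWhile_le _ _
          exact Nat.le_trans h1 hrest
        · have e1 : pvTokens (c :: rest) = [c] :: pvTokens rest := by
            rw [pvTokens]; simp [hd]
          have hdt : pvIsDigitTok [c] = false := by simp [pvIsDigitTok, hd]
          rw [pvMdLoopA, e1, pvLoopT]
          simp only [if_pos hrp, hd, Bool.false_eq_true, if_false, hdt, pvIsMismatchTok]
          by_cases hm : "ACGTN".toList.contains c = true
          · simp only [hm, if_true]
            exact ih rest hrest _ _
          · simp only [hm, Bool.false_eq_true, if_false]
            exact ih rest hrest _ _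
      · rw [pvMdLoopA]
        simp only [if_neg hrp]
        cases hc : pvTokens (c :: rest) with
        | nil => simp [pvLoopT]
        | cons t ts => simp [pvLoopT, if_neg hrp]

lemma pvTakeWhile_nil_of_ge (read_len : Int) (l : List Int) (rp : Int) (hrp : ¬ rp < read_len)
    (hge : ∀ p ∈ l, rp ≤ p) :
    l.takeWhile (fun p => decide (p < read_len)) = [] := by
  cases l with
  | nil => rfl
  | cons p l =>
    rw [List.takeWhile_cons]
    have := hge p (by simp)
    simp only [decide_eq_true_eq]
    rw [if_neg (by omega)]

lemma pvLoopT_eq_pos (read_len : Int) :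
    ∀ ts rp pos, (∀ t ∈ ts, pvWFtok t) →
      pvLoopT read_len ts rp pos = pos ++ (pvPos ts rp).takeWhile (fun p => decide (p < read_len)) := by
  intro ts
  induction ts with
  | nil => intro rp pos _; simp [pvLoopT, pvPos]
  | cons t ts ih =>
    intro rp pos hwf
    have hwf' : ∀ u ∈ ts, pvWFtok u := fun u hu => hwf u (by simp [hu])
    by_cases hrp : rp < read_len
    · rw [pvLoopT, if_pos hrp, pvPos]
      by_cases h1 : pvIsDigitTok t = true
      · have hδ : pvDelta t = pvDigitsVal t := by unfold pvDelta; rw [if_pos h1]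
        rw [if_pos h1, if_pos h1, hδ]
        exact ih _ pos hwf'
      · rw [if_neg h1, if_neg h1]
        by_cases h2 : pvIsMismatchTok t = true
        · have hδ : pvDelta t = 1 := by unfold pvDelta; rw [if_neg h1, if_pos h2]
          rw [if_pos h2, if_pos h2, hδ, List.takeWhile_cons]
          simp only [decide_eq_true_eq]
          rw [if_pos hrp, ih _ _ hwf']
          simp
        · have hδ : pvDelta t = 0 := by unfold pvDelta; rw [if_neg h1, if_neg h2]
          rw [if_neg h2, if_neg h2, hδ, add_zero]
          exact ih _ pos hwf'
    · rw [pvLoopT, if_neg hrp]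
      rw [pvTakeWhile_nil_of_ge read_len _ rp hrp (pvPos_ge (t :: ts) rp hwf)]
      simp

lemma pvStaged_eq_pos :
    ∀ ts (rp : Int),
      (((ts.zip ((ts.map pvDelta).scanl (· + ·) rp)).filter
          (fun tp => !pvIsDigitTok tp.1 && pvIsMismatchTok tp.1)).map (·.2)) = pvPos ts rp := by
  intro ts
  induction ts with
  | nil => intro rp; simp [pvPos]
  | cons t ts ih =>
    intro rp
    rw [List.map_cons, List.scanl_cons, List.zip_cons_cons, List.filter_cons, pvPos]
    by_cases h1 : pvIsDigitTok t = true
    · rw [if_neg (by simp [h1]), if_pos h1]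
      exact ih _
    · by_cases h2 : pvIsMismatchTok t = true
      · rw [if_pos (by simp [h1, h2]), if_neg h1, if_pos h2, List.map_cons]
        simp [ih]
      · rw [if_neg (by simp [h2]), if_neg h1, if_neg h2]
        exact ih _

-- ===== VERDICT (by name: the statement is the Claim_ definition above) =====
theorem parse_md_mismatch_positions_py_spec : Claim_equal_parse_md_mismatch_positions_py := by
  intro read_len md_str _
  unfold Spec_parse_md_mismatch_positions_py parse_md_mismatch_positions_py parse_md_mismatch_positions_py_alt
  rw [pvLoopA_eq_loopT read_len md_str.toList.length md_str.toList le_rfl 0 [],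
    pvLoopT_eq_pos read_len _ 0 [] (pvTokens_wf md_str.toList.length md_str.toList le_rfl)]
  simp [pvStaged_eq_pos]
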